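-- pv_equiv track=rewrite | github.com/nocarryr/wowza_logparse | nomadic_recording_lib/Bases/misc.py | find_nearest_items
-- ===== SOURCE A (Python) =====
-- import bisect
--
-- def find_nearest_items(iterable, value):
--     if not len(iterable):
--         return False
--     if len(iterable) == 1:
--         index = [0, 0]
--         return (index, [iterable[x] for x in index])
--     i = bisect.bisect_left(iterable, value)
--     if i == 0:
--         index = [i, i]
--     elif i >= len(iterable):
--         index = [i - 1, i - 1]
--     else:
--         index = [i - 1, i]
--     return (index, [iterable[x] for x in index])
-- ===== SOURCE B (Python) =====
-- def find_nearest_items(iterable, value):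
--     n = len(iterable)
--     if not n:
--         return False
--
--     def insertion_point(seq):
--         # divide and conquer on slices instead of lo/hi index arithmetic
--         if not seq:
--             return 0
--         m = len(seq) // 2
--         if seq[m] < value:
--             return m + 1 + insertion_point(seq[m + 1:])
--         return insertion_point(seq[:m])
--
--     i = insertion_point(iterable)
--     p = min(max(i - 1, 0), n - 1)
--     q = min(i, n - 1)
--     return ([p, q], [iterable[p], iterable[q]])
-- ===== Notes on version B (the rewrite author's own statement) =====
-- stated objective: alternative
-- what changed: Replaces bisect.bisect_left's iterative lo/hi index loop by a recursive divide-and-conquer on list slices, and replaces the i==0 / i>=len / else branch chain (and the redundant len==1 early return) by arithmetic clamps p=min(max(i-1,0),n-1), q=min(i,n-1).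
-- outside the precondition, e.g. on find_nearest_items([], 0): A returns False, B returns False
import Mathlib
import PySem

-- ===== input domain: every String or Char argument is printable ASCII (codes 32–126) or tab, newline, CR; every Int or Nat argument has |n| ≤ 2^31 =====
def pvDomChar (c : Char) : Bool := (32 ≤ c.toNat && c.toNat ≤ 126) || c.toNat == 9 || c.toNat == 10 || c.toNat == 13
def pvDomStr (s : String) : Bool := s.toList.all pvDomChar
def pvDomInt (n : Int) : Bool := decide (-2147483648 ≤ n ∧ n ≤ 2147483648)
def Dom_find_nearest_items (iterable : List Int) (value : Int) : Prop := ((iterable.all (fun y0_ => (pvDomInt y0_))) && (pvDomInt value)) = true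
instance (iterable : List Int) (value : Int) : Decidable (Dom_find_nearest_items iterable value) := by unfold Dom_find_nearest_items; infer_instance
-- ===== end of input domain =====

-- B replaces bisect_left's lo/hi index loop by recursion on list slices and the branch chain by
-- arithmetic clamps; on the empty list both Pythons return False, rendered here as `none`.

-- ===== PORT A =====
-- CPython's bisect.bisect_left loop: while lo < hi: mid = (lo+hi)//2; if a[mid] < x: lo = mid+1 else hi = mid
def bisectLeftLoop (a : List Int) (x : Int) (lo hi : Nat) : Nat :=
  if lo < hi then
    let mid := (lo + hi) / 2
    if a.getD mid 0 < x then bisectLeftLoop a x (mid + 1) hi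
    else bisectLeftLoop a x lo mid
  else lo
termination_by hi - lo
decreasing_by all_goals omega

def find_nearest_items (iterable : List Int) (value : Int) : Option (List Int × List Int) :=
  if iterable.length = 0 then none      -- Python returns False here
  else if iterable.length = 1 then
    let index : List Int := [0, 0]
    some (index, index.map (fun j => iterable.getD j.toNat 0))  -- indices are in range, so getD is exact
  else
    let i := bisectLeftLoop iterable value 0 iterable.length
    let index : List Int :=
      if i = 0 then [(i : Int), (i : Int)]
      else if i ≥ iterable.length then [(i : Int) - 1, (i : Int) - 1]
      else [(i : Int) - 1, (i : Int)]
    some (index, index.map (fun j => iterable.getD j.toNat 0))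

-- ===== PORT B =====
-- Source B's insertion_point: recursion on slices; seq[m+1:] / seq[:m] with 0 ≤ m < len(seq) are
-- exactly List.drop (m+1) / List.take m
def insertionPoint (value : Int) (seq : List Int) : Nat :=
  if h : seq.length = 0 then 0
  else
    let m := seq.length / 2
    if seq.getD m 0 < value then m + 1 + insertionPoint value (seq.drop (m + 1))
    else insertionPoint value (seq.take m)
termination_by seq.length
decreasing_by all_goals simp only [List.length_drop, List.length_take]; omega

def find_nearest_items_alt (iterable : List Int) (value : Int) : Option (List Int × List Int) :=
  let n := iterable.length
  if n = 0 then none                     -- Python returns False here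
  else
    let i := insertionPoint value iterable
    let p : Int := min (max ((i : Int) - 1) 0) ((n : Int) - 1)
    let q : Int := min (i : Int) ((n : Int) - 1)
    some ([p, q], [iterable.getD p.toNat 0, iterable.getD q.toNat 0])

-- ===== PRECONDITION & SPEC =====
-- Pre_ excludes only the empty list, where A returns False (not a value of the declared tuple type).
def Pre_find_nearest_items (iterable : List Int) (value : Int) : Prop := iterable ≠ []
instance (iterable : List Int) (value : Int) : Decidable (Pre_find_nearest_items iterable value) := by
  unfold Pre_find_nearest_items; infer_instance

def pvWitness_find_nearest_items : List Int × Int := ([1, 3, 3, 7], 4)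

def Spec_find_nearest_items (iterable : List Int) (value : Int) (out : Option (List Int × List Int)) : Prop := out = find_nearest_items_alt iterable value
instance (iterable : List Int) (value : Int) (out : Option (List Int × List Int)) : Decidable (Spec_find_nearest_items iterable value out) := by unfold Spec_find_nearest_items; infer_instance

-- ===== CLAIM (what is proved, stated in full; the proofs are below) =====
def Claim_equal_find_nearest_items : Prop := ∀ (iterable : List Int) (value : Int), Dom_find_nearest_items iterable value → Pre_find_nearest_items iterable value → Spec_find_nearest_items iterable value (find_nearest_items iterable value)

-- ===== LEMMAS AND PROOFS =====

theorem insertionPoint_le (value : Int) (seq : List Int) :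
    insertionPoint value seq ≤ seq.length := by
  induction hn : seq.length using Nat.strong_induction_on generalizing seq with
  | _ n ih =>
    rw [insertionPoint]
    by_cases h0 : seq.length = 0
    · simp [h0]
    · simp only [dif_neg h0]
      have h1 := ih (seq.drop (seq.length / 2 + 1)).length (by simp; omega) _ rfl
      have h2 := ih (seq.take (seq.length / 2)).length (by simp; omega) _ rfl
      simp only [List.length_drop, List.length_take] at h1 h2
      split <;> omega

-- the loop of A on the window [lo, hi) computes lo + B's recursion on the slice l[lo:hi]
theorem bisectLeftLoop_eq_insertionPoint (l : List Int) (x : Int) :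
    ∀ n lo hi, hi - lo = n → lo ≤ hi → hi ≤ l.length →
      bisectLeftLoop l x lo hi = lo + insertionPoint x ((l.drop lo).take (hi - lo)) := by
  intro n
  induction n using Nat.strong_induction_on with
  | _ n ih =>
    intro lo hi hn hle hlen
    have hseqlen : ((l.drop lo).take (hi - lo)).length = hi - lo := by
      simp; omega
    rw [bisectLeftLoop, insertionPoint]
    by_cases hlt : lo < hi
    · have hs0 : ¬ ((l.drop lo).take (hi - lo)).length = 0 := by omega
      rw [if_pos hlt, dif_neg hs0]
      simp only [hseqlen]
      have hmid : (lo + hi) / 2 = lo + (hi - lo) / 2 := by omega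
      have hget : ((l.drop lo).take (hi - lo)).getD ((hi - lo) / 2) 0
          = l.getD ((lo + hi) / 2) 0 := by
        simp only [List.getD_eq_getElem?_getD]
        rw [List.getElem?_take_of_lt (by omega), List.getElem?_drop, hmid]
      rw [hget]
      by_cases hm : l.getD ((lo + hi) / 2) 0 < x
      · simp only [if_pos hm]
        have hdrop : ((l.drop lo).take (hi - lo)).drop ((hi - lo) / 2 + 1)
            = (l.drop ((lo + hi) / 2 + 1)).take (hi - ((lo + hi) / 2 + 1)) := by
          simp only [List.drop_take, List.drop_drop]
          congr 1
          · omega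
          · congr 1
            omega
        rw [ih (hi - ((lo + hi) / 2 + 1)) (by omega) ((lo + hi) / 2 + 1) hi rfl (by omega) hlen,
          hdrop]
        omega
      · simp only [if_neg hm]
        have htake : ((l.drop lo).take (hi - lo)).take ((hi - lo) / 2)
            = (l.drop lo).take ((lo + hi) / 2 - lo) := by
          simp only [List.take_take]
          congr 1
          omega
        rw [ih ((lo + hi) / 2 - lo) (by omega) lo ((lo + hi) / 2) rfl (by omega) (by omega), htake]
    · have h0 : hi - lo = 0 := by omega
      simp [if_neg hlt, h0]

-- A's branch chain on the insertion index equals B's clamped pair, whenever i ≤ n and 1 ≤ n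
theorem branch_eq_clamp (i n : Nat) (hin : i ≤ n) (hn : 1 ≤ n) :
    (if i = 0 then ([(i : Int), (i : Int)] : List Int)
     else if i ≥ n then [(i : Int) - 1, (i : Int) - 1]
     else [(i : Int) - 1, (i : Int)])
    = [min (max ((i : Int) - 1) 0) ((n : Int) - 1), min (i : Int) ((n : Int) - 1)] := by
  split_ifs with h0 hge <;> simp only [List.cons.injEq, and_true] <;>
    constructor <;> omega

-- ===== VERDICT (by name: the statement is the Claim_ definition above) =====
theorem find_nearest_items_spec : Claim_equal_find_nearest_items := by
  intro iterable value _hdom hne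
  unfold Spec_find_nearest_items find_nearest_items find_nearest_items_alt
  have hlen0 : iterable.length ≠ 0 := by simpa [List.length_eq_zero_iff] using hne
  have hn1 : 1 ≤ iterable.length := by omega
  set i := insertionPoint value iterable with hi
  have hile : i ≤ iterable.length := insertionPoint_le value iterable
  have hbis : bisectLeftLoop iterable value 0 iterable.length = i := by
    rw [bisectLeftLoop_eq_insertionPoint iterable value iterable.length 0 iterable.length rfl
      (Nat.zero_le _) le_rfl]
    simp [hi]
  have hclamp := branch_eq_clamp i iterable.length hile hn1
  simp only [if_neg hlen0, hbis, ← hclamp]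
  by_cases h1 : iterable.length = 1
  · -- A takes the early len==1 return; since i ≤ 1 the branch chain also yields [0,0]
    rcases (by omega : i = 0 ∨ i = 1) with h | h <;> simp [h1, h]
  · rw [if_neg h1, hclamp]
    simp
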